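-- pv_equiv track=rewrite | github.com/Ishan-Gijavanekar/Basic-frontend-of-compiler | parser.py | extract_for_expr
-- ===== SOURCE A (Python) =====
-- def extract_for_expr(tokens):
--     # Extract init; cond; inc from for(...) tokens
--     start = None
--     end = None
--     for i, (t, v) in enumerate(tokens):
--         if v == '(':
--             start = i + 1
--             break
--     for j in range(len(tokens)-1, -1, -1):
--         if tokens[j][1] == ')':
--             end = j
--             break
--     if start is None or end is None:
--         return [], [], []
--
--     inner_tokens = tokens[start:end]
--     semicolon_indices = [i for i, (t,v) in enumerate(inner_tokens) if v == ';']
--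
--     if len(semicolon_indices) != 2:
--         return [], [], []
--
--     init = [v for t,v in inner_tokens[:semicolon_indices[0]]]
--     cond = [v for t,v in inner_tokens[semicolon_indices[0]+1:semicolon_indices[1]]]
--     inc = [v for t,v in inner_tokens[semicolon_indices[1]+1:]]
--
--     return init, cond, inc
-- ===== SOURCE B (Python) =====
-- def extract_for_expr(tokens):
--     # Partition the inner tokens on ';' in a single pass into segments;
--     # exactly three segments <=> exactly two semicolons.
--     start = next((i + 1 for i, (t, v) in enumerate(tokens) if v == '('), None)
--     end = next((j for j in range(len(tokens) - 1, -1, -1) if tokens[j][1] == ')'), None)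
--     if start is None or end is None:
--         return [], [], []
--     segs = []
--     cur = []
--     for t, v in tokens[start:end]:
--         if v == ';':
--             segs.append(cur)
--             cur = []
--         else:
--             cur.append(v)
--     segs.append(cur)
--     if len(segs) != 3:
--         return [], [], []
--     return segs[0], segs[1], segs[2]
-- ===== Notes on version B (the rewrite author's own statement) =====
-- stated objective: alternative
-- what changed: Replaces the semicolon-index list plus three absolute-index slices with a single forward pass that partitions the inner tokens into segments on ';', returning them iff there are exactly three.
import Mathlib
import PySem

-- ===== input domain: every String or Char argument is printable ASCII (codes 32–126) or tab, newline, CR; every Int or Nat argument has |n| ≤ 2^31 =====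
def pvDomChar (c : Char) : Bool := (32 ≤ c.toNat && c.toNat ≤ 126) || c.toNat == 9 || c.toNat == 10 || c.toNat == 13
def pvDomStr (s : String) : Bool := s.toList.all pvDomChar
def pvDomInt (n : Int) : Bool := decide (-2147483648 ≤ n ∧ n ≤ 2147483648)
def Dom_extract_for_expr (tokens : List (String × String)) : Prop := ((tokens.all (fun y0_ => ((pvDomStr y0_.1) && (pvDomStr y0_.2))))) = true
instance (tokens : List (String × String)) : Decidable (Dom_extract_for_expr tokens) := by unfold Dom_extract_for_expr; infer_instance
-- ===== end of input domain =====

-- B replaces A's semicolon-index list plus three slices by a single forward pass that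
-- partitions the inner tokens into segments (objective: alternative decomposition, same cost).

-- ===== PORT A =====
-- first loop of A: scan enumerate(tokens) for v == '(' , return i+1
def pvA_findOpen : List (Int × (String × String)) → Option Int
  | [] => none
  | (i, tv) :: rest => if tv.2 = "(" then some (i + 1) else pvA_findOpen rest

-- second loop of A: scan range(len-1,-1,-1) for tokens[j][1] == ')'
def pvA_findClose (tokens : List (String × String)) : List Int → Option Int
  | [] => none
  | j :: rest =>
      if (PySem.List.pyGet? tokens j).map Prod.snd = some ")" then some j
      else pvA_findClose tokens rest

-- A's comprehension: [i for i,(t,v) in enumerate(inner_tokens) if v == ';']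
def pvA_semIdx : Nat → List (String × String) → List Nat
  | _, [] => []
  | i, tv :: rest => if tv.2 = ";" then i :: pvA_semIdx (i + 1) rest else pvA_semIdx (i + 1) rest

def extract_for_expr (tokens : List (String × String)) : List String × List String × List String :=
  let start? := pvA_findOpen (PySem.List.enumerate tokens 0)
  let end? := pvA_findClose tokens (PySem.List.pyRange ((tokens.length : Int) - 1) (-1) (-1))
  match start?, end? with
  | some s, some e =>
      let inner := PySem.List.slice tokens (some s) (some e)
      match pvA_semIdx 0 inner with
      | [i, j] =>
          ((PySem.List.slice inner none (some (i : Int))).map Prod.snd,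
           (PySem.List.slice inner (some ((i : Int) + 1)) (some (j : Int))).map Prod.snd,
           (PySem.List.slice inner (some ((j : Int) + 1)) none).map Prod.snd)
      | _ => ([], [], [])
  | _, _ => ([], [], [])

-- ===== PORT B =====
def extract_for_expr_alt (tokens : List (String × String)) : List String × List String × List String :=
  let start? := ((PySem.List.enumerate tokens 0).find? (fun p => p.2.2 == "(")).map (fun p => p.1 + 1)
  let end? := (PySem.List.pyRange ((tokens.length : Int) - 1) (-1) (-1)).find?
      (fun j => (PySem.List.pyGet? tokens j).map Prod.snd == some ")")
  match start? with
  | none => ([], [], [])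
  | some s =>
    match end? with
    | none => ([], [], [])
    | some e =>
        let sc := (PySem.List.slice tokens (some s) (some e)).foldl
            (fun (sc : List (List String) × List String) tv =>
              if tv.2 = ";" then (sc.1 ++ [sc.2], []) else (sc.1, sc.2 ++ [tv.2])) ([], [])
        let segs := sc.1 ++ [sc.2]
        if segs.length ≠ 3 then ([], [], [])
        else (PySem.List.pyGetD segs 0 [], PySem.List.pyGetD segs 1 [], PySem.List.pyGetD segs 2 [])

-- ===== PRECONDITION & SPEC =====
def Spec_extract_for_expr (tokens : List (String × String)) (out : List String × List String × List String) : Prop := out = extract_for_expr_alt tokens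
instance (tokens : List (String × String)) (out : List String × List String × List String) : Decidable (Spec_extract_for_expr tokens out) := by unfold Spec_extract_for_expr; infer_instance

-- ===== CLAIM (what is proved, stated in full; the proofs are below) =====
def Claim_equal_extract_for_expr : Prop := ∀ (tokens : List (String × String)), Dom_extract_for_expr tokens → Spec_extract_for_expr tokens (extract_for_expr tokens)

-- ===== LEMMAS AND PROOFS =====

-- the two '(' scans agree
theorem findOpen_eq (l : List (Int × (String × String))) :
    pvA_findOpen l = (l.find? (fun p => p.2.2 == "(")).map (fun p => p.1 + 1) := by
  induction l with
  | nil => rfl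
  | cons x rest ih =>
      obtain ⟨i, tv⟩ := x
      by_cases h : tv.2 = "("
      · simp [pvA_findOpen, List.find?, h]
      · have hb : (tv.2 == "(") = false := beq_eq_false_iff_ne.mpr h
        simp [pvA_findOpen, List.find?, h, ih, hb]

-- the two ')' scans agree
theorem findClose_eq (tokens : List (String × String)) (r : List Int) :
    pvA_findClose tokens r =
      r.find? (fun j => (PySem.List.pyGet? tokens j).map Prod.snd == some ")") := by
  induction r with
  | nil => rfl
  | cons j rest ih =>
      by_cases h : (PySem.List.pyGet? tokens j).map Prod.snd = some ")"
      · simp [pvA_findClose, List.find?, h]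
      · have hb : ((PySem.List.pyGet? tokens j).map Prod.snd == some ")") = false :=
          beq_eq_false_iff_ne.mpr h
        simp [pvA_findClose, List.find?, h, ih, hb]

-- B's pass, written as structural recursion (front segment first)
def pvSegsRec : List String → List (String × String) → List (List String)
  | cur, [] => [cur]
  | cur, x :: xs => if x.2 = ";" then cur :: pvSegsRec [] xs else pvSegsRec (cur ++ [x.2]) xs

theorem foldl_segs (l : List (String × String)) :
    ∀ (segs : List (List String)) (cur : List String),
      (l.foldl (fun (sc : List (List String) × List String) tv =>
          if tv.2 = ";" then (sc.1 ++ [sc.2], []) else (sc.1, sc.2 ++ [tv.2])) (segs, cur)).1 ++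
        [(l.foldl (fun (sc : List (List String) × List String) tv =>
          if tv.2 = ";" then (sc.1 ++ [sc.2], []) else (sc.1, sc.2 ++ [tv.2])) (segs, cur)).2]
      = segs ++ pvSegsRec cur l := by
  induction l with
  | nil => intro segs cur; simp [pvSegsRec]
  | cons x xs ih =>
      intro segs cur
      by_cases h : x.2 = ";"
      · simp [List.foldl, h, pvSegsRec, ih]
      · simp [List.foldl, h, pvSegsRec, ih]

theorem segsRec_length (l : List (String × String)) :
    ∀ (cur : List String) (k : Nat),
      (pvSegsRec cur l).length = (pvA_semIdx k l).length + 1 := by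
  induction l with
  | nil => intro cur k; simp [pvSegsRec, pvA_semIdx]
  | cons x xs ih =>
      intro cur k
      by_cases h : x.2 = ";"
      · simp [pvSegsRec, pvA_semIdx, h, ih [] (k+1)]
      · simp [pvSegsRec, pvA_semIdx, h, ih (cur ++ [x.2]) (k+1)]

theorem segsRec_zero (l : List (String × String)) :
    ∀ (cur : List String) (k : Nat), pvA_semIdx k l = [] →
      pvSegsRec cur l = [cur ++ l.map Prod.snd] := by
  induction l with
  | nil => intro cur k _; simp [pvSegsRec]
  | cons x xs ih =>
      intro cur k h
      by_cases hx : x.2 = ";"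
      · simp [pvA_semIdx, hx] at h
      · simp [pvA_semIdx, hx] at h
        simp [pvSegsRec, hx, ih (cur ++ [x.2]) (k+1) h]

theorem segsRec_one (l : List (String × String)) :
    ∀ (cur : List String) (k i : Nat), pvA_semIdx k l = [i] →
      k ≤ i ∧ pvSegsRec cur l =
        [cur ++ (l.take (i - k)).map Prod.snd, (l.drop (i - k + 1)).map Prod.snd] := by
  induction l with
  | nil => intro cur k i h; simp [pvA_semIdx] at h
  | cons x xs ih =>
      intro cur k i h
      by_cases hx : x.2 = ";"
      · simp [pvA_semIdx, hx] at h
        obtain ⟨rfl, h2⟩ := h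
        refine ⟨le_refl _, ?_⟩
        simp [pvSegsRec, hx, segsRec_zero xs [] (k+1) h2]
      · simp [pvA_semIdx, hx] at h
        obtain ⟨hk, heq⟩ := ih (cur ++ [x.2]) (k+1) i h
        refine ⟨by omega, ?_⟩
        have h1 : i - k = (i - (k+1)) + 1 := by omega
        simp [pvSegsRec, hx, heq, h1, List.take_succ_cons, List.drop_succ_cons]

theorem segsRec_two (l : List (String × String)) :
    ∀ (cur : List String) (k i j : Nat), pvA_semIdx k l = [i, j] →
      k ≤ i ∧ i < j ∧ pvSegsRec cur l =
        [cur ++ (l.take (i - k)).map Prod.snd,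
         ((l.drop (i - k + 1)).take (j - i - 1)).map Prod.snd,
         (l.drop (j - k + 1)).map Prod.snd] := by
  induction l with
  | nil => intro cur k i j h; simp [pvA_semIdx] at h
  | cons x xs ih =>
      intro cur k i j h
      by_cases hx : x.2 = ";"
      · simp [pvA_semIdx, hx] at h
        obtain ⟨rfl, h2⟩ := h
        obtain ⟨hk, heq⟩ := segsRec_one xs [] (k+1) j h2
        refine ⟨le_refl _, by omega, ?_⟩
        have h1 : j - k + 1 = (j - (k+1) + 1) + 1 := by omega
        simp [pvSegsRec, hx, heq, h1, List.drop_succ_cons]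
        omega
      · simp [pvA_semIdx, hx] at h
        obtain ⟨hk, hij, heq⟩ := ih (cur ++ [x.2]) (k+1) i j h
        refine ⟨by omega, hij, ?_⟩
        have h1 : i - k = (i - (k+1)) + 1 := by omega
        have h2 : i - k + 1 = (i - (k+1) + 1) + 1 := by omega
        have h3 : j - k + 1 = (j - (k+1) + 1) + 1 := by omega
        simp [pvSegsRec, hx, heq, h1, h3, List.take_succ_cons, List.drop_succ_cons]

-- the two tails agree on an arbitrary inner token list
theorem tail_eq (inner : List (String × String)) :
    (match pvA_semIdx 0 inner with
     | [i, j] =>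
         ((PySem.List.slice inner none (some (i : Int))).map Prod.snd,
          (PySem.List.slice inner (some ((i : Int) + 1)) (some (j : Int))).map Prod.snd,
          (PySem.List.slice inner (some ((j : Int) + 1)) none).map Prod.snd)
     | _ => (([] : List String), ([] : List String), ([] : List String)))
    = (let sc := inner.foldl
          (fun (sc : List (List String) × List String) tv =>
            if tv.2 = ";" then (sc.1 ++ [sc.2], []) else (sc.1, sc.2 ++ [tv.2])) ([], [])
       let segs := sc.1 ++ [sc.2]
       if segs.length ≠ 3 then (([] : List String), ([] : List String), ([] : List String))
       else (PySem.List.pyGetD segs 0 [], PySem.List.pyGetD segs 1 [], PySem.List.pyGetD segs 2 [])) := by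
  have hb := foldl_segs inner [] []
  simp only [List.nil_append] at hb
  have hlen := segsRec_length inner [] 0
  cases hs : pvA_semIdx 0 inner with
  | nil =>
      rw [hs] at hlen
      simp only [hb, hlen]
      simp
  | cons i t =>
      cases t with
      | nil =>
          rw [hs] at hlen
          simp only [hb, hlen]
          simp
      | cons j t2 =>
          cases t2 with
          | nil =>
              obtain ⟨hk, hij, heq⟩ := segsRec_two inner [] 0 i j hs
              simp only [Nat.sub_zero] at heq
              simp only [hb, heq]
              have e1 : PySem.List.slice inner none (some (i : Int)) = inner.take i :=
                PySem.List.slice_to_natCast inner i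
              have e2 : PySem.List.slice inner (some ((i : Int) + 1)) (some (j : Int))
                  = (inner.drop (i+1)).take (j - (i+1)) := by
                have : ((i : Int) + 1) = ((i + 1 : Nat) : Int) := by push_cast; ring
                rw [this]
                exact PySem.List.slice_natCast inner (i+1) j
              have e3 : PySem.List.slice inner (some ((j : Int) + 1)) none = inner.drop (j+1) := by
                have : ((j : Int) + 1) = ((j + 1 : Nat) : Int) := by push_cast; ring
                rw [this]
                exact PySem.List.slice_from_natCast inner (j+1)
              have hj1 : j - (i + 1) = j - i - 1 := by omega
              simp [e1, e2, e3, PySem.List.pyGetD, hj1]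
          | cons z t3 =>
              rw [hs] at hlen
              simp only [hb, hlen]
              simp

-- ===== VERDICT (by name: the statement is the Claim_ definition above) =====
theorem extract_for_expr_spec : Claim_equal_extract_for_expr := by
  intro tokens _
  unfold Spec_extract_for_expr extract_for_expr extract_for_expr_alt
  rw [← findOpen_eq, ← findClose_eq]
  cases pvA_findOpen (PySem.List.enumerate tokens 0) with
  | none => rfl
  | some s =>
      cases pvA_findClose tokens (PySem.List.pyRange ((tokens.length : Int) - 1) (-1) (-1)) with
      | none => rfl
      | some e => exact tail_eq (PySem.List.slice tokens (some s) (some e))
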